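/-
  EXAMPLES: texts of the test corpus (proofs/c6/corpus.py, VALID) with their layouts, written by proofs/c6/tools/genexamples.py. For each text `X`:
    X.text          the bytes                       X.w1, X.layout, X.w2   the JSON text as whitespace ++ layout ++ whitespace
    X.text_eq       the layout renders to the text  X.wf                   it is well-formed (numbers, strings, whitespace)   — both by `decide`
    X.prints        hence `Prints X.layout.value X.text`: the text is valid JSON by the grammar of Json/Grammar.lean
    X.run_d / X.run_s   the model, EVALUATED on the text (token array of `count` zero tokens), gives `count` and exactly the expected tokens
                        (`Layout.tokens`), in both compiled configurations: a check of the definitions against the program, independent of the proofs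
    X.valid_d / X.valid_s (X.invalid_s)   the instances of the theorems of Json/Jsmn/CorrectMain.lean: every token array, any initial content
-/
import Json.Jsmn.CorrectMain
import Json.GrammarCheck

set_option maxRecDepth 100000
namespace Json.Examples
open Jsmn Json

/-! ### rfc_str: '"Hello world!"' -/
def rfc_str.text : List UInt8 :=
  [0x22, 0x48, 0x65, 0x6c, 0x6c, 0x6f, 0x20, 0x77, 0x6f, 0x72, 0x6c, 0x64, 0x21, 0x22]
def rfc_str.w1 : List UInt8 := []
def rfc_str.w2 : List UInt8 := []
def rfc_str.layout : Layout :=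
  .string [0x48, 0x65, 0x6c, 0x6c, 0x6f, 0x20, 0x77, 0x6f, 0x72, 0x6c, 0x64, 0x21]
theorem rfc_str.text_eq : rfc_str.w1 ++ rfc_str.layout.text ++ rfc_str.w2 = rfc_str.text := by decide +kernel
theorem rfc_str.wf : rfc_str.layout.WellFormed := by decide +kernel
theorem rfc_str.prints : Prints rfc_str.layout.value rfc_str.text := Prints.of_layout (by decide) (by decide) rfc_str.wf rfc_str.text_eq
theorem rfc_str.run_d : run Config.default rfc_str.text (some (List.replicate rfc_str.layout.count default)) rfc_str.layout.count =
    some ((rfc_str.layout.count : Int), some (rfc_str.layout.tokens rfc_str.w1.length 0 (-1) |>.map fun t => { t with parent := 0 })) := by decide +kernel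
theorem rfc_str.run_s : run Config.strictLinks rfc_str.text (some (List.replicate rfc_str.layout.count default)) rfc_str.layout.count =
    some ((rfc_str.layout.count : Int), some (rfc_str.layout.tokens rfc_str.w1.length 0 (-1))) := by decide +kernel
theorem rfc_str.valid_d (n : Nat) (ts0 : Tokens) (h0 : ts0.length = n) (hn : n ≤ 2147483648) (hc : rfc_str.layout.count ≤ n) :
    run Config.default rfc_str.text (some ts0) n =
      some ((rfc_str.layout.count : Int), some (stamp Config.default (rfc_str.layout.tokens rfc_str.w1.length 0 (-1)) ts0 ++ ts0.drop rfc_str.layout.count)) := by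
  rw [← rfc_str.text_eq]; exact run_default_valid rfc_str.w1 rfc_str.layout rfc_str.w2 (by decide) (by decide) rfc_str.wf (by decide +kernel) n ts0 h0 hn hc
theorem rfc_str.valid_s (n : Nat) (ts0 : Tokens) (h0 : ts0.length = n) (hn : n ≤ 2147483648) (hc : rfc_str.layout.count ≤ n) :
    run Config.strictLinks rfc_str.text (some ts0) n = some ((rfc_str.layout.count : Int), some (rfc_str.layout.tokens rfc_str.w1.length 0 (-1) ++ ts0.drop rfc_str.layout.count)) := by
  rw [← rfc_str.text_eq]; exact run_strictLinks_valid rfc_str.w1 rfc_str.layout rfc_str.w2 (by decide) (by decide) rfc_str.wf (by decide) (by decide +kernel) n ts0 h0 hn hc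

/-! ### rfc_42: '42' -/
def rfc_42.text : List UInt8 :=
  [0x34, 0x32]
def rfc_42.w1 : List UInt8 := []
def rfc_42.w2 : List UInt8 := []
def rfc_42.layout : Layout :=
  .number [0x34, 0x32]
theorem rfc_42.text_eq : rfc_42.w1 ++ rfc_42.layout.text ++ rfc_42.w2 = rfc_42.text := by decide +kernel
theorem rfc_42.wf : rfc_42.layout.WellFormed := by decide +kernel
theorem rfc_42.prints : Prints rfc_42.layout.value rfc_42.text := Prints.of_layout (by decide) (by decide) rfc_42.wf rfc_42.text_eq
theorem rfc_42.run_d : run Config.default rfc_42.text (some (List.replicate rfc_42.layout.count default)) rfc_42.layout.count =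
    some ((rfc_42.layout.count : Int), some (rfc_42.layout.tokens rfc_42.w1.length 0 (-1) |>.map fun t => { t with parent := 0 })) := by decide +kernel
/-- Valid JSON, REJECTED by the strict build (JSMN_ERROR_PART): a top-level primitive with nothing behind it. -/
theorem rfc_42.run_s : run Config.strictLinks rfc_42.text (some (List.replicate rfc_42.layout.count default)) rfc_42.layout.count =
    some (-3, some (List.replicate rfc_42.layout.count default)) := by decide +kernel
theorem rfc_42.valid_d (n : Nat) (ts0 : Tokens) (h0 : ts0.length = n) (hn : n ≤ 2147483648) (hc : rfc_42.layout.count ≤ n) :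
    run Config.default rfc_42.text (some ts0) n =
      some ((rfc_42.layout.count : Int), some (stamp Config.default (rfc_42.layout.tokens rfc_42.w1.length 0 (-1)) ts0 ++ ts0.drop rfc_42.layout.count)) := by
  rw [← rfc_42.text_eq]; exact run_default_valid rfc_42.w1 rfc_42.layout rfc_42.w2 (by decide) (by decide) rfc_42.wf (by decide +kernel) n ts0 h0 hn hc
theorem rfc_42.invalid_s (toks : Option Tokens) (n : Nat) : run Config.strictLinks rfc_42.text toks n = some (JSMN_ERROR_PART, toks) := by
  rw [show rfc_42.text = rfc_42.w1 ++ rfc_42.layout.text by decide +kernel]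
  exact run_strictLinks_bare_primitive rfc_42.w1 rfc_42.layout (by decide) rfc_42.wf rfl (by decide +kernel) toks n

/-! ### rfc_true: 'true' -/
def rfc_true.text : List UInt8 :=
  [0x74, 0x72, 0x75, 0x65]
def rfc_true.w1 : List UInt8 := []
def rfc_true.w2 : List UInt8 := []
def rfc_true.layout : Layout :=
  .true
theorem rfc_true.text_eq : rfc_true.w1 ++ rfc_true.layout.text ++ rfc_true.w2 = rfc_true.text := by decide +kernel
theorem rfc_true.wf : rfc_true.layout.WellFormed := by decide +kernel
theorem rfc_true.prints : Prints rfc_true.layout.value rfc_true.text := Prints.of_layout (by decide) (by decide) rfc_true.wf rfc_true.text_eq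
theorem rfc_true.run_d : run Config.default rfc_true.text (some (List.replicate rfc_true.layout.count default)) rfc_true.layout.count =
    some ((rfc_true.layout.count : Int), some (rfc_true.layout.tokens rfc_true.w1.length 0 (-1) |>.map fun t => { t with parent := 0 })) := by decide +kernel
/-- Valid JSON, REJECTED by the strict build (JSMN_ERROR_PART): a top-level primitive with nothing behind it. -/
theorem rfc_true.run_s : run Config.strictLinks rfc_true.text (some (List.replicate rfc_true.layout.count default)) rfc_true.layout.count =
    some (-3, some (List.replicate rfc_true.layout.count default)) := by decide +kernel
theorem rfc_true.valid_d (n : Nat) (ts0 : Tokens) (h0 : ts0.length = n) (hn : n ≤ 2147483648) (hc : rfc_true.layout.count ≤ n) :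
    run Config.default rfc_true.text (some ts0) n =
      some ((rfc_true.layout.count : Int), some (stamp Config.default (rfc_true.layout.tokens rfc_true.w1.length 0 (-1)) ts0 ++ ts0.drop rfc_true.layout.count)) := by
  rw [← rfc_true.text_eq]; exact run_default_valid rfc_true.w1 rfc_true.layout rfc_true.w2 (by decide) (by decide) rfc_true.wf (by decide +kernel) n ts0 h0 hn hc
theorem rfc_true.invalid_s (toks : Option Tokens) (n : Nat) : run Config.strictLinks rfc_true.text toks n = some (JSMN_ERROR_PART, toks) := by
  rw [show rfc_true.text = rfc_true.w1 ++ rfc_true.layout.text by decide +kernel]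
  exact run_strictLinks_bare_primitive rfc_true.w1 rfc_true.layout (by decide) rfc_true.wf rfl (by decide +kernel) toks n

/-! ### empty_obj: '{}' -/
def empty_obj.text : List UInt8 :=
  [0x7b, 0x7d]
def empty_obj.w1 : List UInt8 := []
def empty_obj.w2 : List UInt8 := []
def empty_obj.layout : Layout :=
  .object [] .nil
theorem empty_obj.text_eq : empty_obj.w1 ++ empty_obj.layout.text ++ empty_obj.w2 = empty_obj.text := by decide +kernel
theorem empty_obj.wf : empty_obj.layout.WellFormed := by decide +kernel
theorem empty_obj.prints : Prints empty_obj.layout.value empty_obj.text := Prints.of_layout (by decide) (by decide) empty_obj.wf empty_obj.text_eq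
theorem empty_obj.run_d : run Config.default empty_obj.text (some (List.replicate empty_obj.layout.count default)) empty_obj.layout.count =
    some ((empty_obj.layout.count : Int), some (empty_obj.layout.tokens empty_obj.w1.length 0 (-1) |>.map fun t => { t with parent := 0 })) := by decide +kernel
theorem empty_obj.run_s : run Config.strictLinks empty_obj.text (some (List.replicate empty_obj.layout.count default)) empty_obj.layout.count =
    some ((empty_obj.layout.count : Int), some (empty_obj.layout.tokens empty_obj.w1.length 0 (-1))) := by decide +kernel
theorem empty_obj.valid_d (n : Nat) (ts0 : Tokens) (h0 : ts0.length = n) (hn : n ≤ 2147483648) (hc : empty_obj.layout.count ≤ n) :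
    run Config.default empty_obj.text (some ts0) n =
      some ((empty_obj.layout.count : Int), some (stamp Config.default (empty_obj.layout.tokens empty_obj.w1.length 0 (-1)) ts0 ++ ts0.drop empty_obj.layout.count)) := by
  rw [← empty_obj.text_eq]; exact run_default_valid empty_obj.w1 empty_obj.layout empty_obj.w2 (by decide) (by decide) empty_obj.wf (by decide +kernel) n ts0 h0 hn hc
theorem empty_obj.valid_s (n : Nat) (ts0 : Tokens) (h0 : ts0.length = n) (hn : n ≤ 2147483648) (hc : empty_obj.layout.count ≤ n) :
    run Config.strictLinks empty_obj.text (some ts0) n = some ((empty_obj.layout.count : Int), some (empty_obj.layout.tokens empty_obj.w1.length 0 (-1) ++ ts0.drop empty_obj.layout.count)) := by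
  rw [← empty_obj.text_eq]; exact run_strictLinks_valid empty_obj.w1 empty_obj.layout empty_obj.w2 (by decide) (by decide) empty_obj.wf (by decide) (by decide +kernel) n ts0 h0 hn hc

/-! ### empty_arr: '[]' -/
def empty_arr.text : List UInt8 :=
  [0x5b, 0x5d]
def empty_arr.w1 : List UInt8 := []
def empty_arr.w2 : List UInt8 := []
def empty_arr.layout : Layout :=
  .array [] .nil
theorem empty_arr.text_eq : empty_arr.w1 ++ empty_arr.layout.text ++ empty_arr.w2 = empty_arr.text := by decide +kernel
theorem empty_arr.wf : empty_arr.layout.WellFormed := by decide +kernel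
theorem empty_arr.prints : Prints empty_arr.layout.value empty_arr.text := Prints.of_layout (by decide) (by decide) empty_arr.wf empty_arr.text_eq
theorem empty_arr.run_d : run Config.default empty_arr.text (some (List.replicate empty_arr.layout.count default)) empty_arr.layout.count =
    some ((empty_arr.layout.count : Int), some (empty_arr.layout.tokens empty_arr.w1.length 0 (-1) |>.map fun t => { t with parent := 0 })) := by decide +kernel
theorem empty_arr.run_s : run Config.strictLinks empty_arr.text (some (List.replicate empty_arr.layout.count default)) empty_arr.layout.count =
    some ((empty_arr.layout.count : Int), some (empty_arr.layout.tokens empty_arr.w1.length 0 (-1))) := by decide +kernel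
theorem empty_arr.valid_d (n : Nat) (ts0 : Tokens) (h0 : ts0.length = n) (hn : n ≤ 2147483648) (hc : empty_arr.layout.count ≤ n) :
    run Config.default empty_arr.text (some ts0) n =
      some ((empty_arr.layout.count : Int), some (stamp Config.default (empty_arr.layout.tokens empty_arr.w1.length 0 (-1)) ts0 ++ ts0.drop empty_arr.layout.count)) := by
  rw [← empty_arr.text_eq]; exact run_default_valid empty_arr.w1 empty_arr.layout empty_arr.w2 (by decide) (by decide) empty_arr.wf (by decide +kernel) n ts0 h0 hn hc
theorem empty_arr.valid_s (n : Nat) (ts0 : Tokens) (h0 : ts0.length = n) (hn : n ≤ 2147483648) (hc : empty_arr.layout.count ≤ n) :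
    run Config.strictLinks empty_arr.text (some ts0) n = some ((empty_arr.layout.count : Int), some (empty_arr.layout.tokens empty_arr.w1.length 0 (-1) ++ ts0.drop empty_arr.layout.count)) := by
  rw [← empty_arr.text_eq]; exact run_strictLinks_valid empty_arr.w1 empty_arr.layout empty_arr.w2 (by decide) (by decide) empty_arr.wf (by decide) (by decide +kernel) n ts0 h0 hn hc

/-! ### empty_str: '""' -/
def empty_str.text : List UInt8 :=
  [0x22, 0x22]
def empty_str.w1 : List UInt8 := []
def empty_str.w2 : List UInt8 := []
def empty_str.layout : Layout :=
  .string []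
theorem empty_str.text_eq : empty_str.w1 ++ empty_str.layout.text ++ empty_str.w2 = empty_str.text := by decide +kernel
theorem empty_str.wf : empty_str.layout.WellFormed := by decide +kernel
theorem empty_str.prints : Prints empty_str.layout.value empty_str.text := Prints.of_layout (by decide) (by decide) empty_str.wf empty_str.text_eq
theorem empty_str.run_d : run Config.default empty_str.text (some (List.replicate empty_str.layout.count default)) empty_str.layout.count =
    some ((empty_str.layout.count : Int), some (empty_str.layout.tokens empty_str.w1.length 0 (-1) |>.map fun t => { t with parent := 0 })) := by decide +kernel
theorem empty_str.run_s : run Config.strictLinks empty_str.text (some (List.replicate empty_str.layout.count default)) empty_str.layout.count =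
    some ((empty_str.layout.count : Int), some (empty_str.layout.tokens empty_str.w1.length 0 (-1))) := by decide +kernel
theorem empty_str.valid_d (n : Nat) (ts0 : Tokens) (h0 : ts0.length = n) (hn : n ≤ 2147483648) (hc : empty_str.layout.count ≤ n) :
    run Config.default empty_str.text (some ts0) n =
      some ((empty_str.layout.count : Int), some (stamp Config.default (empty_str.layout.tokens empty_str.w1.length 0 (-1)) ts0 ++ ts0.drop empty_str.layout.count)) := by
  rw [← empty_str.text_eq]; exact run_default_valid empty_str.w1 empty_str.layout empty_str.w2 (by decide) (by decide) empty_str.wf (by decide +kernel) n ts0 h0 hn hc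
theorem empty_str.valid_s (n : Nat) (ts0 : Tokens) (h0 : ts0.length = n) (hn : n ≤ 2147483648) (hc : empty_str.layout.count ≤ n) :
    run Config.strictLinks empty_str.text (some ts0) n = some ((empty_str.layout.count : Int), some (empty_str.layout.tokens empty_str.w1.length 0 (-1) ++ ts0.drop empty_str.layout.count)) := by
  rw [← empty_str.text_eq]; exact run_strictLinks_valid empty_str.w1 empty_str.layout empty_str.w2 (by decide) (by decide) empty_str.wf (by decide) (by decide +kernel) n ts0 h0 hn hc

/-! ### null: 'null' -/
def null.text : List UInt8 :=
  [0x6e, 0x75, 0x6c, 0x6c]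
def null.w1 : List UInt8 := []
def null.w2 : List UInt8 := []
def null.layout : Layout :=
  .null
theorem null.text_eq : null.w1 ++ null.layout.text ++ null.w2 = null.text := by decide +kernel
theorem null.wf : null.layout.WellFormed := by decide +kernel
theorem null.prints : Prints null.layout.value null.text := Prints.of_layout (by decide) (by decide) null.wf null.text_eq
theorem null.run_d : run Config.default null.text (some (List.replicate null.layout.count default)) null.layout.count =
    some ((null.layout.count : Int), some (null.layout.tokens null.w1.length 0 (-1) |>.map fun t => { t with parent := 0 })) := by decide +kernel
/-- Valid JSON, REJECTED by the strict build (JSMN_ERROR_PART): a top-level primitive with nothing behind it. -/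
theorem null.run_s : run Config.strictLinks null.text (some (List.replicate null.layout.count default)) null.layout.count =
    some (-3, some (List.replicate null.layout.count default)) := by decide +kernel
theorem null.valid_d (n : Nat) (ts0 : Tokens) (h0 : ts0.length = n) (hn : n ≤ 2147483648) (hc : null.layout.count ≤ n) :
    run Config.default null.text (some ts0) n =
      some ((null.layout.count : Int), some (stamp Config.default (null.layout.tokens null.w1.length 0 (-1)) ts0 ++ ts0.drop null.layout.count)) := by
  rw [← null.text_eq]; exact run_default_valid null.w1 null.layout null.w2 (by decide) (by decide) null.wf (by decide +kernel) n ts0 h0 hn hc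
theorem null.invalid_s (toks : Option Tokens) (n : Nat) : run Config.strictLinks null.text toks n = some (JSMN_ERROR_PART, toks) := by
  rw [show null.text = null.w1 ++ null.layout.text by decide +kernel]
  exact run_strictLinks_bare_primitive null.w1 null.layout (by decide) null.wf rfl (by decide +kernel) toks n

/-! ### false: 'false' -/
def false.text : List UInt8 :=
  [0x66, 0x61, 0x6c, 0x73, 0x65]
def false.w1 : List UInt8 := []
def false.w2 : List UInt8 := []
def false.layout : Layout :=
  .false
theorem false.text_eq : false.w1 ++ false.layout.text ++ false.w2 = false.text := by decide +kernel
theorem false.wf : false.layout.WellFormed := by decide +kernel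
theorem false.prints : Prints false.layout.value false.text := Prints.of_layout (by decide) (by decide) false.wf false.text_eq
theorem false.run_d : run Config.default false.text (some (List.replicate false.layout.count default)) false.layout.count =
    some ((false.layout.count : Int), some (false.layout.tokens false.w1.length 0 (-1) |>.map fun t => { t with parent := 0 })) := by decide +kernel
/-- Valid JSON, REJECTED by the strict build (JSMN_ERROR_PART): a top-level primitive with nothing behind it. -/
theorem false.run_s : run Config.strictLinks false.text (some (List.replicate false.layout.count default)) false.layout.count =
    some (-3, some (List.replicate false.layout.count default)) := by decide +kernel
theorem false.valid_d (n : Nat) (ts0 : Tokens) (h0 : ts0.length = n) (hn : n ≤ 2147483648) (hc : false.layout.count ≤ n) :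
    run Config.default false.text (some ts0) n =
      some ((false.layout.count : Int), some (stamp Config.default (false.layout.tokens false.w1.length 0 (-1)) ts0 ++ ts0.drop false.layout.count)) := by
  rw [← false.text_eq]; exact run_default_valid false.w1 false.layout false.w2 (by decide) (by decide) false.wf (by decide +kernel) n ts0 h0 hn hc
theorem false.invalid_s (toks : Option Tokens) (n : Nat) : run Config.strictLinks false.text toks n = some (JSMN_ERROR_PART, toks) := by
  rw [show false.text = false.w1 ++ false.layout.text by decide +kernel]
  exact run_strictLinks_bare_primitive false.w1 false.layout (by decide) false.wf rfl (by decide +kernel) toks n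

/-! ### zero: '0' -/
def zero.text : List UInt8 :=
  [0x30]
def zero.w1 : List UInt8 := []
def zero.w2 : List UInt8 := []
def zero.layout : Layout :=
  .number [0x30]
theorem zero.text_eq : zero.w1 ++ zero.layout.text ++ zero.w2 = zero.text := by decide +kernel
theorem zero.wf : zero.layout.WellFormed := by decide +kernel
theorem zero.prints : Prints zero.layout.value zero.text := Prints.of_layout (by decide) (by decide) zero.wf zero.text_eq
theorem zero.run_d : run Config.default zero.text (some (List.replicate zero.layout.count default)) zero.layout.count =
    some ((zero.layout.count : Int), some (zero.layout.tokens zero.w1.length 0 (-1) |>.map fun t => { t with parent := 0 })) := by decide +kernel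
/-- Valid JSON, REJECTED by the strict build (JSMN_ERROR_PART): a top-level primitive with nothing behind it. -/
theorem zero.run_s : run Config.strictLinks zero.text (some (List.replicate zero.layout.count default)) zero.layout.count =
    some (-3, some (List.replicate zero.layout.count default)) := by decide +kernel
theorem zero.valid_d (n : Nat) (ts0 : Tokens) (h0 : ts0.length = n) (hn : n ≤ 2147483648) (hc : zero.layout.count ≤ n) :
    run Config.default zero.text (some ts0) n =
      some ((zero.layout.count : Int), some (stamp Config.default (zero.layout.tokens zero.w1.length 0 (-1)) ts0 ++ ts0.drop zero.layout.count)) := by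
  rw [← zero.text_eq]; exact run_default_valid zero.w1 zero.layout zero.w2 (by decide) (by decide) zero.wf (by decide +kernel) n ts0 h0 hn hc
theorem zero.invalid_s (toks : Option Tokens) (n : Nat) : run Config.strictLinks zero.text toks n = some (JSMN_ERROR_PART, toks) := by
  rw [show zero.text = zero.w1 ++ zero.layout.text by decide +kernel]
  exact run_strictLinks_bare_primitive zero.w1 zero.layout (by decide) zero.wf rfl (by decide +kernel) toks n

/-! ### neg: '-0' -/
def neg.text : List UInt8 :=
  [0x2d, 0x30]
def neg.w1 : List UInt8 := []
def neg.w2 : List UInt8 := []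
def neg.layout : Layout :=
  .number [0x2d, 0x30]
theorem neg.text_eq : neg.w1 ++ neg.layout.text ++ neg.w2 = neg.text := by decide +kernel
theorem neg.wf : neg.layout.WellFormed := by decide +kernel
theorem neg.prints : Prints neg.layout.value neg.text := Prints.of_layout (by decide) (by decide) neg.wf neg.text_eq
theorem neg.run_d : run Config.default neg.text (some (List.replicate neg.layout.count default)) neg.layout.count =
    some ((neg.layout.count : Int), some (neg.layout.tokens neg.w1.length 0 (-1) |>.map fun t => { t with parent := 0 })) := by decide +kernel
/-- Valid JSON, REJECTED by the strict build (JSMN_ERROR_PART): a top-level primitive with nothing behind it. -/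
theorem neg.run_s : run Config.strictLinks neg.text (some (List.replicate neg.layout.count default)) neg.layout.count =
    some (-3, some (List.replicate neg.layout.count default)) := by decide +kernel
theorem neg.valid_d (n : Nat) (ts0 : Tokens) (h0 : ts0.length = n) (hn : n ≤ 2147483648) (hc : neg.layout.count ≤ n) :
    run Config.default neg.text (some ts0) n =
      some ((neg.layout.count : Int), some (stamp Config.default (neg.layout.tokens neg.w1.length 0 (-1)) ts0 ++ ts0.drop neg.layout.count)) := by
  rw [← neg.text_eq]; exact run_default_valid neg.w1 neg.layout neg.w2 (by decide) (by decide) neg.wf (by decide +kernel) n ts0 h0 hn hc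
theorem neg.invalid_s (toks : Option Tokens) (n : Nat) : run Config.strictLinks neg.text toks n = some (JSMN_ERROR_PART, toks) := by
  rw [show neg.text = neg.w1 ++ neg.layout.text by decide +kernel]
  exact run_strictLinks_bare_primitive neg.w1 neg.layout (by decide) neg.wf rfl (by decide +kernel) toks n

/-! ### num_frac: '3.14159' -/
def num_frac.text : List UInt8 :=
  [0x33, 0x2e, 0x31, 0x34, 0x31, 0x35, 0x39]
def num_frac.w1 : List UInt8 := []
def num_frac.w2 : List UInt8 := []
def num_frac.layout : Layout :=
  .number [0x33, 0x2e, 0x31, 0x34, 0x31, 0x35, 0x39]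
theorem num_frac.text_eq : num_frac.w1 ++ num_frac.layout.text ++ num_frac.w2 = num_frac.text := by decide +kernel
theorem num_frac.wf : num_frac.layout.WellFormed := by decide +kernel
theorem num_frac.prints : Prints num_frac.layout.value num_frac.text := Prints.of_layout (by decide) (by decide) num_frac.wf num_frac.text_eq
theorem num_frac.run_d : run Config.default num_frac.text (some (List.replicate num_frac.layout.count default)) num_frac.layout.count =
    some ((num_frac.layout.count : Int), some (num_frac.layout.tokens num_frac.w1.length 0 (-1) |>.map fun t => { t with parent := 0 })) := by decide +kernel
/-- Valid JSON, REJECTED by the strict build (JSMN_ERROR_PART): a top-level primitive with nothing behind it. -/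
theorem num_frac.run_s : run Config.strictLinks num_frac.text (some (List.replicate num_frac.layout.count default)) num_frac.layout.count =
    some (-3, some (List.replicate num_frac.layout.count default)) := by decide +kernel
theorem num_frac.valid_d (n : Nat) (ts0 : Tokens) (h0 : ts0.length = n) (hn : n ≤ 2147483648) (hc : num_frac.layout.count ≤ n) :
    run Config.default num_frac.text (some ts0) n =
      some ((num_frac.layout.count : Int), some (stamp Config.default (num_frac.layout.tokens num_frac.w1.length 0 (-1)) ts0 ++ ts0.drop num_frac.layout.count)) := by
  rw [← num_frac.text_eq]; exact run_default_valid num_frac.w1 num_frac.layout num_frac.w2 (by decide) (by decide) num_frac.wf (by decide +kernel) n ts0 h0 hn hc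
theorem num_frac.invalid_s (toks : Option Tokens) (n : Nat) : run Config.strictLinks num_frac.text toks n = some (JSMN_ERROR_PART, toks) := by
  rw [show num_frac.text = num_frac.w1 ++ num_frac.layout.text by decide +kernel]
  exact run_strictLinks_bare_primitive num_frac.w1 num_frac.layout (by decide) num_frac.wf rfl (by decide +kernel) toks n

/-! ### num_exp: '6.02e23' -/
def num_exp.text : List UInt8 :=
  [0x36, 0x2e, 0x30, 0x32, 0x65, 0x32, 0x33]
def num_exp.w1 : List UInt8 := []
def num_exp.w2 : List UInt8 := []
def num_exp.layout : Layout :=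
  .number [0x36, 0x2e, 0x30, 0x32, 0x65, 0x32, 0x33]
theorem num_exp.text_eq : num_exp.w1 ++ num_exp.layout.text ++ num_exp.w2 = num_exp.text := by decide +kernel
theorem num_exp.wf : num_exp.layout.WellFormed := by decide +kernel
theorem num_exp.prints : Prints num_exp.layout.value num_exp.text := Prints.of_layout (by decide) (by decide) num_exp.wf num_exp.text_eq
theorem num_exp.run_d : run Config.default num_exp.text (some (List.replicate num_exp.layout.count default)) num_exp.layout.count =
    some ((num_exp.layout.count : Int), some (num_exp.layout.tokens num_exp.w1.length 0 (-1) |>.map fun t => { t with parent := 0 })) := by decide +kernel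
/-- Valid JSON, REJECTED by the strict build (JSMN_ERROR_PART): a top-level primitive with nothing behind it. -/
theorem num_exp.run_s : run Config.strictLinks num_exp.text (some (List.replicate num_exp.layout.count default)) num_exp.layout.count =
    some (-3, some (List.replicate num_exp.layout.count default)) := by decide +kernel
theorem num_exp.valid_d (n : Nat) (ts0 : Tokens) (h0 : ts0.length = n) (hn : n ≤ 2147483648) (hc : num_exp.layout.count ≤ n) :
    run Config.default num_exp.text (some ts0) n =
      some ((num_exp.layout.count : Int), some (stamp Config.default (num_exp.layout.tokens num_exp.w1.length 0 (-1)) ts0 ++ ts0.drop num_exp.layout.count)) := by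
  rw [← num_exp.text_eq]; exact run_default_valid num_exp.w1 num_exp.layout num_exp.w2 (by decide) (by decide) num_exp.wf (by decide +kernel) n ts0 h0 hn hc
theorem num_exp.invalid_s (toks : Option Tokens) (n : Nat) : run Config.strictLinks num_exp.text toks n = some (JSMN_ERROR_PART, toks) := by
  rw [show num_exp.text = num_exp.w1 ++ num_exp.layout.text by decide +kernel]
  exact run_strictLinks_bare_primitive num_exp.w1 num_exp.layout (by decide) num_exp.wf rfl (by decide +kernel) toks n

/-! ### num_exp2: '-1.5E-10' -/
def num_exp2.text : List UInt8 :=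
  [0x2d, 0x31, 0x2e, 0x35, 0x45, 0x2d, 0x31, 0x30]
def num_exp2.w1 : List UInt8 := []
def num_exp2.w2 : List UInt8 := []
def num_exp2.layout : Layout :=
  .number [0x2d, 0x31, 0x2e, 0x35, 0x45, 0x2d, 0x31, 0x30]
theorem num_exp2.text_eq : num_exp2.w1 ++ num_exp2.layout.text ++ num_exp2.w2 = num_exp2.text := by decide +kernel
theorem num_exp2.wf : num_exp2.layout.WellFormed := by decide +kernel
theorem num_exp2.prints : Prints num_exp2.layout.value num_exp2.text := Prints.of_layout (by decide) (by decide) num_exp2.wf num_exp2.text_eq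
theorem num_exp2.run_d : run Config.default num_exp2.text (some (List.replicate num_exp2.layout.count default)) num_exp2.layout.count =
    some ((num_exp2.layout.count : Int), some (num_exp2.layout.tokens num_exp2.w1.length 0 (-1) |>.map fun t => { t with parent := 0 })) := by decide +kernel
/-- Valid JSON, REJECTED by the strict build (JSMN_ERROR_PART): a top-level primitive with nothing behind it. -/
theorem num_exp2.run_s : run Config.strictLinks num_exp2.text (some (List.replicate num_exp2.layout.count default)) num_exp2.layout.count =
    some (-3, some (List.replicate num_exp2.layout.count default)) := by decide +kernel
theorem num_exp2.valid_d (n : Nat) (ts0 : Tokens) (h0 : ts0.length = n) (hn : n ≤ 2147483648) (hc : num_exp2.layout.count ≤ n) :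
    run Config.default num_exp2.text (some ts0) n =
      some ((num_exp2.layout.count : Int), some (stamp Config.default (num_exp2.layout.tokens num_exp2.w1.length 0 (-1)) ts0 ++ ts0.drop num_exp2.layout.count)) := by
  rw [← num_exp2.text_eq]; exact run_default_valid num_exp2.w1 num_exp2.layout num_exp2.w2 (by decide) (by decide) num_exp2.wf (by decide +kernel) n ts0 h0 hn hc
theorem num_exp2.invalid_s (toks : Option Tokens) (n : Nat) : run Config.strictLinks num_exp2.text toks n = some (JSMN_ERROR_PART, toks) := by
  rw [show num_exp2.text = num_exp2.w1 ++ num_exp2.layout.text by decide +kernel]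
  exact run_strictLinks_bare_primitive num_exp2.w1 num_exp2.layout (by decide) num_exp2.wf rfl (by decide +kernel) toks n

/-! ### num_exp3: '1e+5' -/
def num_exp3.text : List UInt8 :=
  [0x31, 0x65, 0x2b, 0x35]
def num_exp3.w1 : List UInt8 := []
def num_exp3.w2 : List UInt8 := []
def num_exp3.layout : Layout :=
  .number [0x31, 0x65, 0x2b, 0x35]
theorem num_exp3.text_eq : num_exp3.w1 ++ num_exp3.layout.text ++ num_exp3.w2 = num_exp3.text := by decide +kernel
theorem num_exp3.wf : num_exp3.layout.WellFormed := by decide +kernel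
theorem num_exp3.prints : Prints num_exp3.layout.value num_exp3.text := Prints.of_layout (by decide) (by decide) num_exp3.wf num_exp3.text_eq
theorem num_exp3.run_d : run Config.default num_exp3.text (some (List.replicate num_exp3.layout.count default)) num_exp3.layout.count =
    some ((num_exp3.layout.count : Int), some (num_exp3.layout.tokens num_exp3.w1.length 0 (-1) |>.map fun t => { t with parent := 0 })) := by decide +kernel
/-- Valid JSON, REJECTED by the strict build (JSMN_ERROR_PART): a top-level primitive with nothing behind it. -/
theorem num_exp3.run_s : run Config.strictLinks num_exp3.text (some (List.replicate num_exp3.layout.count default)) num_exp3.layout.count =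
    some (-3, some (List.replicate num_exp3.layout.count default)) := by decide +kernel
theorem num_exp3.valid_d (n : Nat) (ts0 : Tokens) (h0 : ts0.length = n) (hn : n ≤ 2147483648) (hc : num_exp3.layout.count ≤ n) :
    run Config.default num_exp3.text (some ts0) n =
      some ((num_exp3.layout.count : Int), some (stamp Config.default (num_exp3.layout.tokens num_exp3.w1.length 0 (-1)) ts0 ++ ts0.drop num_exp3.layout.count)) := by
  rw [← num_exp3.text_eq]; exact run_default_valid num_exp3.w1 num_exp3.layout num_exp3.w2 (by decide) (by decide) num_exp3.wf (by decide +kernel) n ts0 h0 hn hc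
theorem num_exp3.invalid_s (toks : Option Tokens) (n : Nat) : run Config.strictLinks num_exp3.text toks n = some (JSMN_ERROR_PART, toks) := by
  rw [show num_exp3.text = num_exp3.w1 ++ num_exp3.layout.text by decide +kernel]
  exact run_strictLinks_bare_primitive num_exp3.w1 num_exp3.layout (by decide) num_exp3.wf rfl (by decide +kernel) toks n

/-! ### num_big: '123456789012345678901234567890' -/
def num_big.text : List UInt8 :=
  [0x31, 0x32, 0x33, 0x34, 0x35, 0x36, 0x37, 0x38, 0x39, 0x30, 0x31, 0x32, 0x33, 0x34, 0x35, 0x36, 0x37, 0x38, 0x39, 0x30, 0x31, 0x32, 0x33, 0x34, 0x35, 0x36, 0x37, 0x38, 0x39, 0x30]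
def num_big.w1 : List UInt8 := []
def num_big.w2 : List UInt8 := []
def num_big.layout : Layout :=
  .number [0x31, 0x32, 0x33, 0x34, 0x35, 0x36, 0x37, 0x38, 0x39, 0x30, 0x31, 0x32, 0x33, 0x34, 0x35, 0x36, 0x37, 0x38, 0x39, 0x30, 0x31, 0x32, 0x33, 0x34, 0x35, 0x36, 0x37, 0x38, 0x39, 0x30]
theorem num_big.text_eq : num_big.w1 ++ num_big.layout.text ++ num_big.w2 = num_big.text := by decide +kernel
theorem num_big.wf : num_big.layout.WellFormed := by decide +kernel
theorem num_big.prints : Prints num_big.layout.value num_big.text := Prints.of_layout (by decide) (by decide) num_big.wf num_big.text_eq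
theorem num_big.run_d : run Config.default num_big.text (some (List.replicate num_big.layout.count default)) num_big.layout.count =
    some ((num_big.layout.count : Int), some (num_big.layout.tokens num_big.w1.length 0 (-1) |>.map fun t => { t with parent := 0 })) := by decide +kernel
/-- Valid JSON, REJECTED by the strict build (JSMN_ERROR_PART): a top-level primitive with nothing behind it. -/
theorem num_big.run_s : run Config.strictLinks num_big.text (some (List.replicate num_big.layout.count default)) num_big.layout.count =
    some (-3, some (List.replicate num_big.layout.count default)) := by decide +kernel
theorem num_big.valid_d (n : Nat) (ts0 : Tokens) (h0 : ts0.length = n) (hn : n ≤ 2147483648) (hc : num_big.layout.count ≤ n) :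
    run Config.default num_big.text (some ts0) n =
      some ((num_big.layout.count : Int), some (stamp Config.default (num_big.layout.tokens num_big.w1.length 0 (-1)) ts0 ++ ts0.drop num_big.layout.count)) := by
  rw [← num_big.text_eq]; exact run_default_valid num_big.w1 num_big.layout num_big.w2 (by decide) (by decide) num_big.wf (by decide +kernel) n ts0 h0 hn hc
theorem num_big.invalid_s (toks : Option Tokens) (n : Nat) : run Config.strictLinks num_big.text toks n = some (JSMN_ERROR_PART, toks) := by
  rw [show num_big.text = num_big.w1 ++ num_big.layout.text by decide +kernel]
  exact run_strictLinks_bare_primitive num_big.w1 num_big.layout (by decide) num_big.wf rfl (by decide +kernel) toks n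

/-! ### nest_arr: '[[[[[[[[[[]]]]]]]]]]' -/
def nest_arr.text : List UInt8 :=
  [0x5b, 0x5b, 0x5b, 0x5b, 0x5b, 0x5b, 0x5b, 0x5b, 0x5b, 0x5b, 0x5d, 0x5d, 0x5d, 0x5d, 0x5d, 0x5d, 0x5d, 0x5d, 0x5d, 0x5d]
def nest_arr.w1 : List UInt8 := []
def nest_arr.w2 : List UInt8 := []
def nest_arr.layout : Layout :=
  .array [] (.cons [] (.array [] (.cons [] (.array [] (.cons [] (.array [] (.cons [] (.array [] (.cons [] (.array [] (.cons [] (.array [] (.cons [] (.array [] (.cons [] (.array [] (.cons [] (.array [] .nil) [] .nil)) [] .nil)) [] .nil)) [] .nil)) [] .nil)) [] .nil)) [] .nil)) [] .nil)) [] .nil)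
theorem nest_arr.text_eq : nest_arr.w1 ++ nest_arr.layout.text ++ nest_arr.w2 = nest_arr.text := by decide +kernel
theorem nest_arr.wf : nest_arr.layout.WellFormed := by decide +kernel
theorem nest_arr.prints : Prints nest_arr.layout.value nest_arr.text := Prints.of_layout (by decide) (by decide) nest_arr.wf nest_arr.text_eq
theorem nest_arr.run_d : run Config.default nest_arr.text (some (List.replicate nest_arr.layout.count default)) nest_arr.layout.count =
    some ((nest_arr.layout.count : Int), some (nest_arr.layout.tokens nest_arr.w1.length 0 (-1) |>.map fun t => { t with parent := 0 })) := by decide +kernel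
theorem nest_arr.run_s : run Config.strictLinks nest_arr.text (some (List.replicate nest_arr.layout.count default)) nest_arr.layout.count =
    some ((nest_arr.layout.count : Int), some (nest_arr.layout.tokens nest_arr.w1.length 0 (-1))) := by decide +kernel
theorem nest_arr.valid_d (n : Nat) (ts0 : Tokens) (h0 : ts0.length = n) (hn : n ≤ 2147483648) (hc : nest_arr.layout.count ≤ n) :
    run Config.default nest_arr.text (some ts0) n =
      some ((nest_arr.layout.count : Int), some (stamp Config.default (nest_arr.layout.tokens nest_arr.w1.length 0 (-1)) ts0 ++ ts0.drop nest_arr.layout.count)) := by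
  rw [← nest_arr.text_eq]; exact run_default_valid nest_arr.w1 nest_arr.layout nest_arr.w2 (by decide) (by decide) nest_arr.wf (by decide +kernel) n ts0 h0 hn hc
theorem nest_arr.valid_s (n : Nat) (ts0 : Tokens) (h0 : ts0.length = n) (hn : n ≤ 2147483648) (hc : nest_arr.layout.count ≤ n) :
    run Config.strictLinks nest_arr.text (some ts0) n = some ((nest_arr.layout.count : Int), some (nest_arr.layout.tokens nest_arr.w1.length 0 (-1) ++ ts0.drop nest_arr.layout.count)) := by
  rw [← nest_arr.text_eq]; exact run_strictLinks_valid nest_arr.w1 nest_arr.layout nest_arr.w2 (by decide) (by decide) nest_arr.wf (by decide) (by decide +kernel) n ts0 h0 hn hc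

/-! ### nest_obj: '{"a":{"b":{"c":{"d":{"e":{}}}}}}' -/
def nest_obj.text : List UInt8 :=
  [0x7b, 0x22, 0x61, 0x22, 0x3a, 0x7b, 0x22, 0x62, 0x22, 0x3a, 0x7b, 0x22, 0x63, 0x22, 0x3a, 0x7b, 0x22, 0x64, 0x22, 0x3a, 0x7b, 0x22, 0x65, 0x22, 0x3a, 0x7b, 0x7d, 0x7d, 0x7d, 0x7d, 0x7d, 0x7d]
def nest_obj.w1 : List UInt8 := []
def nest_obj.w2 : List UInt8 := []
def nest_obj.layout : Layout :=
  .object [] (.cons [] [0x61] [] [] (.object [] (.cons [] [0x62] [] [] (.object [] (.cons [] [0x63] [] [] (.object [] (.cons [] [0x64] [] [] (.object [] (.cons [] [0x65] [] [] (.object [] .nil) [] .nil)) [] .nil)) [] .nil)) [] .nil)) [] .nil)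
theorem nest_obj.text_eq : nest_obj.w1 ++ nest_obj.layout.text ++ nest_obj.w2 = nest_obj.text := by decide +kernel
theorem nest_obj.wf : nest_obj.layout.WellFormed := by decide +kernel
theorem nest_obj.prints : Prints nest_obj.layout.value nest_obj.text := Prints.of_layout (by decide) (by decide) nest_obj.wf nest_obj.text_eq
theorem nest_obj.run_d : run Config.default nest_obj.text (some (List.replicate nest_obj.layout.count default)) nest_obj.layout.count =
    some ((nest_obj.layout.count : Int), some (nest_obj.layout.tokens nest_obj.w1.length 0 (-1) |>.map fun t => { t with parent := 0 })) := by decide +kernel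
theorem nest_obj.run_s : run Config.strictLinks nest_obj.text (some (List.replicate nest_obj.layout.count default)) nest_obj.layout.count =
    some ((nest_obj.layout.count : Int), some (nest_obj.layout.tokens nest_obj.w1.length 0 (-1))) := by decide +kernel
theorem nest_obj.valid_d (n : Nat) (ts0 : Tokens) (h0 : ts0.length = n) (hn : n ≤ 2147483648) (hc : nest_obj.layout.count ≤ n) :
    run Config.default nest_obj.text (some ts0) n =
      some ((nest_obj.layout.count : Int), some (stamp Config.default (nest_obj.layout.tokens nest_obj.w1.length 0 (-1)) ts0 ++ ts0.drop nest_obj.layout.count)) := by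
  rw [← nest_obj.text_eq]; exact run_default_valid nest_obj.w1 nest_obj.layout nest_obj.w2 (by decide) (by decide) nest_obj.wf (by decide +kernel) n ts0 h0 hn hc
theorem nest_obj.valid_s (n : Nat) (ts0 : Tokens) (h0 : ts0.length = n) (hn : n ≤ 2147483648) (hc : nest_obj.layout.count ≤ n) :
    run Config.strictLinks nest_obj.text (some ts0) n = some ((nest_obj.layout.count : Int), some (nest_obj.layout.tokens nest_obj.w1.length 0 (-1) ++ ts0.drop nest_obj.layout.count)) := by
  rw [← nest_obj.text_eq]; exact run_strictLinks_valid nest_obj.w1 nest_obj.layout nest_obj.w2 (by decide) (by decide) nest_obj.wf (by decide) (by decide +kernel) n ts0 h0 hn hc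

/-! ### nest_mix: '[{"a":[{"b":[{"c":[1,2,{"d":null}]}]}]}]' -/
def nest_mix.text : List UInt8 :=
  [0x5b, 0x7b, 0x22, 0x61, 0x22, 0x3a, 0x5b, 0x7b, 0x22, 0x62, 0x22, 0x3a, 0x5b, 0x7b, 0x22, 0x63, 0x22, 0x3a, 0x5b, 0x31, 0x2c, 0x32, 0x2c, 0x7b, 0x22, 0x64, 0x22, 0x3a, 0x6e, 0x75, 0x6c, 0x6c, 0x7d, 0x5d, 0x7d, 0x5d, 0x7d, 0x5d, 0x7d, 0x5d]
def nest_mix.w1 : List UInt8 := []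
def nest_mix.w2 : List UInt8 := []
def nest_mix.layout : Layout :=
  .array [] (.cons [] (.object [] (.cons [] [0x61] [] [] (.array [] (.cons [] (.object [] (.cons [] [0x62] [] [] (.array [] (.cons [] (.object [] (.cons [] [0x63] [] [] (.array [] (.cons [] (.number [0x31]) [] (.cons [] (.number [0x32]) [] (.cons [] (.object [] (.cons [] [0x64] [] [] .null [] .nil)) [] .nil)))) [] .nil)) [] .nil)) [] .nil)) [] .nil)) [] .nil)) [] .nil)
theorem nest_mix.text_eq : nest_mix.w1 ++ nest_mix.layout.text ++ nest_mix.w2 = nest_mix.text := by decide +kernel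
theorem nest_mix.wf : nest_mix.layout.WellFormed := by decide +kernel
theorem nest_mix.prints : Prints nest_mix.layout.value nest_mix.text := Prints.of_layout (by decide) (by decide) nest_mix.wf nest_mix.text_eq
theorem nest_mix.run_d : run Config.default nest_mix.text (some (List.replicate nest_mix.layout.count default)) nest_mix.layout.count =
    some ((nest_mix.layout.count : Int), some (nest_mix.layout.tokens nest_mix.w1.length 0 (-1) |>.map fun t => { t with parent := 0 })) := by decide +kernel
theorem nest_mix.run_s : run Config.strictLinks nest_mix.text (some (List.replicate nest_mix.layout.count default)) nest_mix.layout.count =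
    some ((nest_mix.layout.count : Int), some (nest_mix.layout.tokens nest_mix.w1.length 0 (-1))) := by decide +kernel
theorem nest_mix.valid_d (n : Nat) (ts0 : Tokens) (h0 : ts0.length = n) (hn : n ≤ 2147483648) (hc : nest_mix.layout.count ≤ n) :
    run Config.default nest_mix.text (some ts0) n =
      some ((nest_mix.layout.count : Int), some (stamp Config.default (nest_mix.layout.tokens nest_mix.w1.length 0 (-1)) ts0 ++ ts0.drop nest_mix.layout.count)) := by
  rw [← nest_mix.text_eq]; exact run_default_valid nest_mix.w1 nest_mix.layout nest_mix.w2 (by decide) (by decide) nest_mix.wf (by decide +kernel) n ts0 h0 hn hc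
theorem nest_mix.valid_s (n : Nat) (ts0 : Tokens) (h0 : ts0.length = n) (hn : n ≤ 2147483648) (hc : nest_mix.layout.count ≤ n) :
    run Config.strictLinks nest_mix.text (some ts0) n = some ((nest_mix.layout.count : Int), some (nest_mix.layout.tokens nest_mix.w1.length 0 (-1) ++ ts0.drop nest_mix.layout.count)) := by
  rw [← nest_mix.text_eq]; exact run_strictLinks_valid nest_mix.w1 nest_mix.layout nest_mix.w2 (by decide) (by decide) nest_mix.wf (by decide) (by decide +kernel) n ts0 h0 hn hc

end Json.Examples
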